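-- pv_equiv track=rewrite | github.com/Dev-ERAK/PythonPraticeCode | Daily Classes/01..04.2022/Special Subsequences.py | solve
-- ===== SOURCE A (Python) =====
-- def solve(A):
--
--     count_A = 0
--     totalPair = 0
--
--     for ele in A:
--
--         if "A".__eq__(ele):
--             count_A += 1
--
--         elif "G".__eq__(ele):
--             totalPair += count_A
--
--     return totalPair
-- ===== SOURCE B (Python) =====
-- def solve(A):
--     remaining_G = A.count("G")
--     totalPair = 0
--     for ele in A:
--         if ele == "A":
--             totalPair += remaining_G
--         elif ele == "G":
--             remaining_G -= 1
--     return totalPair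
-- ===== Notes on version B (the rewrite author's own statement) =====
-- stated objective: faster
-- what changed: B precomputes the total 'G' count once, then attributes pairs per 'A' by adding the number of G's still ahead, instead of A's per-'G' accumulation of A's seen so far via bound __eq__ calls.
import Mathlib
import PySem

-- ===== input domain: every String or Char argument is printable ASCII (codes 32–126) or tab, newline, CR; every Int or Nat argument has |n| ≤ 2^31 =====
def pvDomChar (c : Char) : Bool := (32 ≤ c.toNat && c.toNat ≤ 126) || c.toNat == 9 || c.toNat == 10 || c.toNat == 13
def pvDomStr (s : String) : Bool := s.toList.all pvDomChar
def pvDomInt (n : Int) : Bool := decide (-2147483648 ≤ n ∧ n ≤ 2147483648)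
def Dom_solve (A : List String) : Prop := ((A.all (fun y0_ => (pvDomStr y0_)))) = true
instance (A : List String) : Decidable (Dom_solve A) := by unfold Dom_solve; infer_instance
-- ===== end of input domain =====

-- B precomputes the G total and attributes pairs per 'A'; alternative decomposition, same value.
-- ===== PORT A =====
def solve (A : List String) : Int :=
  (A.foldl
    (fun (st : Int × Int) ele =>
      if "A" = ele then (st.1 + 1, st.2)
      else if "G" = ele then (st.1, st.2 + st.1)
      else st)
    (0, 0)).2

-- ===== PORT B =====
def solve_alt (A : List String) : Int :=
  let remaining_G : Int := (PySem.List.count A "G" : Int)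
  (A.foldl
    (fun (st : Int × Int) ele =>
      if ele = "A" then (st.1, st.2 + st.1)
      else if ele = "G" then (st.1 - 1, st.2)
      else st)
    (remaining_G, 0)).2

-- ===== PRECONDITION & SPEC =====
def Spec_solve (A : List String) (out : Int) : Prop := out = solve_alt A
instance (A : List String) (out : Int) : Decidable (Spec_solve A out) := by unfold Spec_solve; infer_instance

-- ===== CLAIM (what is proved, stated in full; the proofs are below) =====
def Claim_equal_solve : Prop := ∀ (A : List String), Dom_solve A → Spec_solve A (solve A)

-- ===== LEMMAS AND PROOFS =====

-- number of (i,j) pairs with i<j, A[i]="A", A[j]="G"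
def pvPairs : List String → Int
  | [] => 0
  | x :: xs => (if x = "A" then (xs.count "G" : Int) else 0) + pvPairs xs

theorem pvFoldA (l : List String) (c t : Int) :
    (l.foldl
      (fun (st : Int × Int) ele =>
        if "A" = ele then (st.1 + 1, st.2)
        else if "G" = ele then (st.1, st.2 + st.1)
        else st)
      (c, t)).2 = t + c * (l.count "G" : Int) + pvPairs l := by
  induction l generalizing c t with
  | nil => simp [pvPairs]
  | cons x xs ih =>
    by_cases hA : "A" = x
    · subst hA
      rw [List.foldl_cons, if_pos rfl, ih]
      simp only [pvPairs, List.count_cons,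
        (by decide : (("G":String) == "A") = false)]
      norm_num; push_cast; ring
    · by_cases hG : "G" = x
      · subst hG
        rw [List.foldl_cons, if_neg hA, if_pos rfl, ih]
        simp only [pvPairs, List.count_cons,
          if_neg (by decide : ¬("G":String) = "A"), beq_self_eq_true]
        norm_num; push_cast; ring
      · rw [List.foldl_cons, if_neg hA, if_neg hG, ih]
        simp only [pvPairs, List.count_cons,
          if_neg (fun h : x = "A" => hA h.symm), beq_eq_false_iff_ne.mpr hG]
        norm_num
        exact Or.inl (fun h => hG h.symm)

theorem pvFoldB (l : List String) (r t : Int) :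
    (l.foldl
      (fun (st : Int × Int) ele =>
        if ele = "A" then (st.1, st.2 + st.1)
        else if ele = "G" then (st.1 - 1, st.2)
        else st)
      (r, t)).2
    = t + (r - (l.count "G" : Int)) * (l.count "A" : Int) + pvPairs l := by
  induction l generalizing r t with
  | nil => simp [pvPairs]
  | cons x xs ih =>
    by_cases hA : x = "A"
    · subst hA
      rw [List.foldl_cons, if_pos rfl, ih]
      simp only [pvPairs, List.count_cons, beq_self_eq_true,
        (by decide : (("G":String) == "A") = false),
        (by decide : (("A":String) == "A") = true)]
      norm_num; push_cast; ring
    · by_cases hG : x = "G"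
      · subst hG
        rw [List.foldl_cons, if_neg hA, if_pos rfl, ih]
        simp only [pvPairs, List.count_cons,
          if_neg (by decide : ¬("G":String) = "A"),
          (by decide : (("G":String) == "G") = true),
          (by decide : (("A":String) == "G") = false)]
        norm_num; ring_nf
        simp
      · rw [List.foldl_cons, if_neg hA, if_neg hG, ih]
        simp only [pvPairs, List.count_cons, if_neg hA,
          beq_eq_false_iff_ne.mpr (fun h : "G" = x => hG h.symm),
          beq_eq_false_iff_ne.mpr (fun h : "A" = x => hA h.symm)]
        norm_num
        simp [hA, hG]

-- ===== VERDICT (by name: the statement is the Claim_ definition above) =====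
theorem solve_spec : Claim_equal_solve := by
  intro A _
  unfold Spec_solve solve solve_alt
  rw [pvFoldA, pvFoldB]
  simp [PySem.List.count]
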